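-- pv_equiv track=rewrite | github.com/NuageRoue/CUPGE1 | SR/finalProject/VProf/serveur.py | WinVert
-- ===== SOURCE A (Python) =====
-- def WinVert(grid:list,player:int)->bool:
--     """
--         fonction verifiant verticalement la victoire du joueur player dans la grille grid : on verifie si on a 5 chiffres player se suivant verticalement
--     """
--     lenGrid = len(grid)
--     for j in range(lenGrid):
--         for i in range(lenGrid):
--             if grid[i][j] == player:#si on tombe sur le chiffre recherche :
--                 looked = i
--                 align = 0
--                 while looked < lenGrid and grid[looked][j] == player: # on parcourt le reste de la ligne tant qu'on retrouve le meme chiffre ;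
--                     align += 1
--                     looked += 1
--                 if align == 5: #quand ils ne correspondent plus, on verifie si on en a bien parcouru 4
--                         return True #si c'est le cas, c'est gagne !
--     return False
-- ===== SOURCE B (Python) =====
-- def WinVert(grid: list, player: int) -> bool:
--     n = len(grid)
--     for j in range(n):
--         count = 0
--         for row in grid:
--             if row[j] == player:
--                 count += 1
--                 if count >= 5:
--                     return True
--             else:
--                 count = 0
--     return False
-- ===== Notes on version B (the rewrite author's own statement) =====
-- stated objective: simpler
-- what changed: Instead of re-scanning the rest of the column from every matching cell (and testing the run length for equality with 5), B makes one pass per column keeping a running count of consecutive matches and returns as soon as the count reaches 5.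
-- outside the precondition, e.g. on WinVert([[1], [1], [1], [1], [1]], 1): A returns True, B returns True
import Mathlib
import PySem

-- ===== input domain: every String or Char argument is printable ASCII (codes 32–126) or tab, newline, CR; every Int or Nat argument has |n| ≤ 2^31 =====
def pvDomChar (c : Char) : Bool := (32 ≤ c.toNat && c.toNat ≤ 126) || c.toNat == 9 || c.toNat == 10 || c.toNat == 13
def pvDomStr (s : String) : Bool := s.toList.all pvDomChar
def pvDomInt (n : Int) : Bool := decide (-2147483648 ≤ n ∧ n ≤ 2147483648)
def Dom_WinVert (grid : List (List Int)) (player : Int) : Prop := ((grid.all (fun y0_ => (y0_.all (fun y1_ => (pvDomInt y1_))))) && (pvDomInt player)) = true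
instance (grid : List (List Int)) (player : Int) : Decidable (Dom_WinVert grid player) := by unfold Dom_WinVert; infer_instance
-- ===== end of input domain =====

-- B replaces A's per-cell rescan of the rest of the column by a single counting pass
-- per column (objective: simpler — one running count per column instead of a rescan from every match).

-- ===== PORT A =====
-- grid[i][j] for in-range indices (Pre_ guarantees the indices A uses are in range)
def pvCell (grid : List (List Int)) (i j : Nat) : Int := (grid.getD i []).getD j 0

-- the inner while loop: counts consecutive cells equal to player downwards from `looked`
def pvRunLen (grid : List (List Int)) (player : Int) (j n looked : Nat) : Nat :=
  if h : looked < n ∧ pvCell grid looked j = player then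
    pvRunLen grid player j n (looked + 1) + 1
  else 0
termination_by n - looked
decreasing_by omega

def WinVert (grid : List (List Int)) (player : Int) : Bool :=
  let n := grid.length
  (List.range n).any (fun j =>
    (List.range n).any (fun i =>
      if pvCell grid i j = player then pvRunLen grid player j n i == 5 else false))

-- ===== PORT B =====
-- one pass down a column: running count of consecutive matches, trigger at 5
def pvColCheck (rows : List (List Int)) (player : Int) (j count : Nat) : Bool :=
  match rows with
  | [] => false
  | row :: rest =>
    if row.getD j 0 = player then
      if 5 ≤ count + 1 then true else pvColCheck rest player j (count + 1)
    else pvColCheck rest player j 0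

def WinVert_alt (grid : List (List Int)) (player : Int) : Bool :=
  (List.range grid.length).any (fun j => pvColCheck grid player j 0)

-- ===== PRECONDITION & SPEC =====
-- Pre_ excludes ragged grids with a row shorter than the number of rows, on which A's
-- grid[i][j] can raise IndexError (though both programs may return True early before
-- reaching the short row, as in the cite).
def Pre_WinVert (grid : List (List Int)) (player : Int) : Prop :=
  ∀ row ∈ grid, grid.length ≤ row.length
instance (grid : List (List Int)) (player : Int) : Decidable (Pre_WinVert grid player) := by
  unfold Pre_WinVert; infer_instance

def pvWitness_WinVert : List (List Int) × Int := ([[0, 1], [1, 1]], 1)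

def Spec_WinVert (grid : List (List Int)) (player : Int) (out : Bool) : Prop := out = WinVert_alt grid player
instance (grid : List (List Int)) (player : Int) (out : Bool) : Decidable (Spec_WinVert grid player out) := by unfold Spec_WinVert; infer_instance

-- ===== CLAIM (what is proved, stated in full; the proofs are below) =====
def Claim_equal_WinVert : Prop := ∀ (grid : List (List Int)) (player : Int), Dom_WinVert grid player → Pre_WinVert grid player → Spec_WinVert grid player (WinVert grid player)

-- ===== LEMMAS AND PROOFS =====

-- length of the initial run of `player` in a list
def pvRun (player : Int) : List Int → Nat
  | [] => 0
  | a :: t => if a = player then pvRun player t + 1 else 0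

-- pure-list version of B's column pass
def pvColCheckL (player : Int) (cs : List Int) (count : Nat) : Bool :=
  match cs with
  | [] => false
  | a :: t =>
    if a = player then
      if 5 ≤ count + 1 then true else pvColCheckL player t (count + 1)
    else pvColCheckL player t 0

def pvHasRun (player : Int) (cs : List Int) : Prop := ∃ i, 5 ≤ pvRun player (cs.drop i)

theorem pvCell_map (grid : List (List Int)) (j i : Nat) :
    (grid.map (fun r => r.getD j 0)).getD i 0 = pvCell grid i j := by
  induction grid generalizing i with
  | nil => cases i <;> simp [pvCell]
  | cons r t ih => cases i with
    | zero => simp [pvCell]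
    | succ k => simpa [pvCell] using ih k

theorem pvRunLen_eq (grid : List (List Int)) (player : Int) (j i : Nat) :
    pvRunLen grid player j grid.length i =
      pvRun player ((grid.map (fun r => r.getD j 0)).drop i) := by
  by_cases h : i < grid.length
  · have hdrop : (grid.map (fun r => r.getD j 0)).drop i =
        (grid.map (fun r => r.getD j 0))[i]'(by simpa using h) ::
          (grid.map (fun r => r.getD j 0)).drop (i + 1) :=
      (List.getElem_cons_drop _).symm
    have hcell : (grid.map (fun r => r.getD j 0))[i]'(by simpa using h) = pvCell grid i j := by
      have := pvCell_map grid j i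
      rwa [List.getD_eq_getElem _ _ (by simpa using h)] at this
    rw [pvRunLen, hdrop]
    simp only [pvRun, hcell]
    by_cases hc : pvCell grid i j = player
    · rw [dif_pos ⟨h, hc⟩, if_pos hc, pvRunLen_eq grid player j (i + 1)]
    · rw [dif_neg (by tauto), if_neg hc]
  · rw [pvRunLen, dif_neg (by tauto), List.drop_eq_nil_of_le (by simpa using h), pvRun]
termination_by grid.length - i
decreasing_by omega

theorem pvColCheck_eq (rows : List (List Int)) (player : Int) (j c : Nat) :
    pvColCheck rows player j c = pvColCheckL player (rows.map (fun r => r.getD j 0)) c := by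
  induction rows generalizing c with
  | nil => rfl
  | cons r t ih => simp only [pvColCheck, List.map, pvColCheckL]; split_ifs <;> simp [ih]

theorem pvHasRun_cons (player : Int) (a : Int) (t : List Int) :
    pvHasRun player (a :: t) ↔ 5 ≤ pvRun player (a :: t) ∨ pvHasRun player t := by
  constructor
  · rintro ⟨i, hi⟩
    cases i with
    | zero => exact Or.inl (by simpa using hi)
    | succ k => exact Or.inr ⟨k, by simpa using hi⟩
  · rintro (h | ⟨i, hi⟩)
    · exact ⟨0, by simpa using h⟩
    · exact ⟨i + 1, by simpa using hi⟩

theorem pvColCheckL_char (player : Int) (cs : List Int) (c : Nat) (hc : c ≤ 4) :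
    pvColCheckL player cs c = true ↔ 5 ≤ c + pvRun player cs ∨ pvHasRun player cs := by
  induction cs generalizing c with
  | nil =>
    simp only [pvColCheckL, pvRun]
    constructor
    · intro h; exact absurd h (by simp)
    · rintro (h | ⟨i, hi⟩)
      · omega
      · simp [pvRun] at hi
  | cons a t ih =>
    simp only [pvColCheckL]
    by_cases ha : a = player
    · rw [if_pos ha]
      by_cases h5 : 5 ≤ c + 1
      · rw [if_pos h5]
        constructor
        · intro _; exact Or.inl (by simp only [pvRun, if_pos ha]; omega)
        · intro _; rfl
      · rw [if_neg h5, ih (c + 1) (by omega), pvHasRun_cons]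
        simp only [pvRun, if_pos ha]
        constructor
        · rintro (h | h)
          · exact Or.inl (by omega)
          · exact Or.inr (Or.inr h)
        · rintro (h | h | h)
          · exact Or.inl (by omega)
          · exact Or.inl (by omega)
          · exact Or.inr h
    · rw [if_neg ha, ih 0 (by omega), pvHasRun_cons]
      simp only [pvRun, if_neg ha]
      constructor
      · rintro (h | h)
        · exact Or.inr (Or.inr ⟨0, by simpa using h⟩)
        · exact Or.inr (Or.inr h)
      · rintro (h | h | h)
        · omega
        · omega
        · exact Or.inr h

theorem pvRun_step (player : Int) (cs : List Int) (i : Nat)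
    (h : 0 < pvRun player (cs.drop i)) :
    i < cs.length ∧ cs.getD i 0 = player ∧
      pvRun player (cs.drop (i + 1)) = pvRun player (cs.drop i) - 1 := by
  by_cases hi : i < cs.length
  · have hdrop : cs.drop i = cs[i] :: cs.drop (i + 1) := (List.getElem_cons_drop _).symm
    rw [hdrop] at h
    simp only [pvRun] at h
    by_cases ha : cs[i] = player
    · refine ⟨hi, ?_, ?_⟩
      · rw [List.getD_eq_getElem _ _ hi, ha]
      · rw [hdrop]; simp [pvRun, if_pos ha]
    · rw [if_neg ha] at h; omega
  · rw [List.drop_eq_nil_of_le (by omega)] at h; simp [pvRun] at h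

theorem pvRun_descend (player : Int) (cs : List Int) (i k : Nat)
    (h : k ≤ pvRun player (cs.drop i)) :
    pvRun player (cs.drop (i + k)) = pvRun player (cs.drop i) - k := by
  induction k generalizing i with
  | zero => simp
  | succ m ih =>
    have hpos : 0 < pvRun player (cs.drop i) := by omega
    obtain ⟨_, _, hstep⟩ := pvRun_step player cs i hpos
    have := ih (i + 1) (by omega)
    rw [show i + (m + 1) = i + 1 + m by omega, this, hstep]
    omega

theorem pvAny_char (player : Int) (cs : List Int) :
    ((List.range cs.length).any (fun i =>
        if cs.getD i 0 = player then pvRun player (cs.drop i) == 5 else false)) = true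
      ↔ pvHasRun player cs := by
  rw [List.any_eq_true]
  constructor
  · rintro ⟨i, _, hi⟩
    split_ifs at hi with h
    exact ⟨i, by simp at hi; omega⟩
  · rintro ⟨i, hi⟩
    set r := pvRun player (cs.drop i) with hr
    have h5 : pvRun player (cs.drop (i + (r - 5))) = 5 := by
      rw [pvRun_descend player cs i (r - 5) (by omega)]; omega
    obtain ⟨hlt, hget, _⟩ := pvRun_step player cs (i + (r - 5)) (by omega)
    refine ⟨i + (r - 5), List.mem_range.mpr hlt, ?_⟩
    rw [if_pos hget]
    simp [h5]

theorem pvColCheckL_char0 (player : Int) (cs : List Int) :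
    pvColCheckL player cs 0 = true ↔ pvHasRun player cs := by
  rw [pvColCheckL_char player cs 0 (by omega)]
  constructor
  · rintro (h | h)
    · exact ⟨0, by simpa using h⟩
    · exact h
  · exact fun h => Or.inr h

theorem pvCol_eq (grid : List (List Int)) (player : Int) (j : Nat) :
    ((List.range grid.length).any (fun i =>
        if pvCell grid i j = player then pvRunLen grid player j grid.length i == 5 else false))
      = pvColCheck grid player j 0 := by
  have hfun : (fun i => if pvCell grid i j = player then (pvRunLen grid player j grid.length i == 5) else false)
      = (fun i => if (grid.map (fun r => r.getD j 0)).getD i 0 = player then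
          (pvRun player ((grid.map (fun r => r.getD j 0)).drop i) == 5) else false) := by
    funext i
    rw [← pvCell_map grid j i, pvRunLen_eq grid player j i]
  rw [hfun, pvColCheck_eq grid player j 0]
  have hlen : (grid.map (fun r => r.getD j 0)).length = grid.length := by simp
  rw [← hlen]
  have h1 := pvAny_char player (grid.map (fun r => r.getD j 0))
  have h2 := pvColCheckL_char0 player (grid.map (fun r => r.getD j 0))
  rcases Bool.eq_false_or_eq_true (pvColCheckL player (grid.map (fun r => r.getD j 0)) 0) with hb | hb
  · rw [hb, h1]
    exact h2.mp hb
  · rw [hb, ← Bool.not_eq_true, h1]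
    intro hr
    rw [h2.mpr hr] at hb
    cases hb

-- ===== VERDICT (by name: the statement is the Claim_ definition above) =====
theorem WinVert_spec : Claim_equal_WinVert := by
  intro grid player _ _
  show WinVert grid player = WinVert_alt grid player
  unfold WinVert WinVert_alt
  have key : ((List.range grid.length).any fun j =>
      (List.range grid.length).any fun i =>
        if pvCell grid i j = player then pvRunLen grid player j grid.length i == 5 else false)
      = (List.range grid.length).any fun j => pvColCheck grid player j 0 := by
    congr 1
    funext j
    exact pvCol_eq grid player j
  exact key
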